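-- pv_equiv track=rewrite | github.com/Anshidtp/Aira-Dental-Voice-Assistant | backend/core/language_service.py | is_kerala_region
-- ===== SOURCE A (Python) =====
-- from typing import Optional, Dict
--
-- def is_kerala_region(phone: Optional[str] = None) -> bool:
--     """
--     Determine if caller is from Kerala region
--
--     Args:
--         phone: Phone number (can check area code)
--
--     Returns:
--         True if Kerala region
--     """
--     # Kerala STD codes: 0471-0499, 0480-0489
--     # This is a simple heuristic
--     if phone and phone.startswith("+91"):
--         # Check for Kerala area codes (simplified)
--         kerala_codes = ["471", "472", "473", "474", "475", "476", "477",
--                       "478", "479", "480", "481", "482", "483", "484",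
--                       "485", "486", "487", "488", "489", "490", "491"]
--
--         for code in kerala_codes:
--             if code in phone:
--                 return True
--
--     return False
-- ===== SOURCE B (Python) =====
-- def is_kerala_region(phone=None):
--     """Single left-to-right window scan instead of 21 substring searches."""
--     if not (phone and phone.startswith("+91")):
--         return False
--     s = phone
--     for i in range(len(s) - 2):
--         if s[i] == '4':
--             b, c = s[i + 1], s[i + 2]
--             if ((b == '7' and '1' <= c <= '9')
--                     or (b == '8' and '0' <= c <= '9')
--                     or (b == '9' and (c == '0' or c == '1'))):
--                 return True
--     return False
-- ===== Notes on version B (the rewrite author's own statement) =====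
-- stated objective: alternative
-- what changed: Replaces the loop over 21 hard-coded area-code strings with 21 substring searches by a single left-to-right pass over the phone string that tests each 3-character window against the contiguous code range 471-491 via character comparisons.
import Mathlib
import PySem

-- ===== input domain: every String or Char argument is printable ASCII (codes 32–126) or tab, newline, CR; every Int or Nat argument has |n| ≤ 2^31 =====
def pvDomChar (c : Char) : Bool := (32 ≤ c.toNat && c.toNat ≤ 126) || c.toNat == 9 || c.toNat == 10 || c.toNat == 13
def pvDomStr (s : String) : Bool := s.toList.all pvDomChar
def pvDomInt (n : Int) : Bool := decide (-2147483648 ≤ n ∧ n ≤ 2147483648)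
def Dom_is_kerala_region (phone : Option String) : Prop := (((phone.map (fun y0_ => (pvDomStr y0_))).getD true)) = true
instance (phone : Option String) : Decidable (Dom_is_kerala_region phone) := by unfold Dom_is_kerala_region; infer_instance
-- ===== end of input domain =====

-- B replaces A's 21 repeated substring searches with a single left-to-right window scan
-- using a character-range test (objective: alternative algorithm of similar cost).


-- ===== PORT A =====
def keralaCodes : List String :=
  ["471", "472", "473", "474", "475", "476", "477",
   "478", "479", "480", "481", "482", "483", "484",
   "485", "486", "487", "488", "489", "490", "491"]

-- the 'for code in kerala_codes: if code in phone: return True' loop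
def loopCodes : List String → String → Bool
  | [], _ => false
  | code :: rest, s => if PySem.Str.isIn code s then true else loopCodes rest s

def is_kerala_region (phone : Option String) : Bool :=
  match phone with
  | none => false
  | some s =>
    if (!(s == "")) && PySem.Str.startswith s "+91" then loopCodes keralaCodes s
    else false

-- ===== PORT B =====
-- the inner window test of Source B: s[i]=='4' and the (b, c) range checks
def checkWin (a b c : Char) : Bool :=
  a == '4' &&
    ((b == '7' && (decide ('1' ≤ c) && decide (c ≤ '9'))) ||
     (b == '8' && (decide ('0' ≤ c) && decide (c ≤ '9'))) ||
     (b == '9' && (c == '0' || c == '1')))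

-- Source B's 'for i in range(len(s) - 2)' pass, one window per step
def scanChars : List Char → Bool
  | a :: b :: c :: rest => if checkWin a b c then true else scanChars (b :: c :: rest)
  | _ => false

def is_kerala_region_alt (phone : Option String) : Bool :=
  match phone with
  | none => false
  | some s =>
    if (!(s == "")) && PySem.Str.startswith s "+91" then scanChars s.toList
    else false

-- ===== PRECONDITION & SPEC =====
def Spec_is_kerala_region (phone : Option String) (out : Bool) : Prop := out = is_kerala_region_alt phone
instance (phone : Option String) (out : Bool) : Decidable (Spec_is_kerala_region phone out) := by unfold Spec_is_kerala_region; infer_instance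

-- ===== CLAIM (what is proved, stated in full; the proofs are below) =====
def Claim_equal_is_kerala_region : Prop := ∀ (phone : Option String), Dom_is_kerala_region phone → Spec_is_kerala_region phone (is_kerala_region phone)

-- ===== LEMMAS AND PROOFS =====

theorem loopCodes_iff (l : List String) (s : String) :
    loopCodes l s = true ↔ ∃ c ∈ l, c.toList <:+: s.toList := by
  induction l with
  | nil => simp [loopCodes]
  | cons code rest ih =>
      simp only [loopCodes]
      split_ifs with h
      · simp only [true_iff]
        exact ⟨code, List.mem_cons_self, (PySem.Str.isIn_iff_infix code s).mp h⟩
      · rw [ih]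
        constructor
        · rintro ⟨c, hc, hinf⟩; exact ⟨c, List.mem_cons_of_mem _ hc, hinf⟩
        · rintro ⟨c, hc, hinf⟩
          rcases List.mem_cons.mp hc with rfl | hc'
          · exact absurd ((PySem.Str.isIn_iff_infix c s).mpr hinf) h
          · exact ⟨c, hc', hinf⟩

theorem digit_enum (c : Char) (h1 : '0' ≤ c) (h2 : c ≤ '9') :
    c = '0' ∨ c = '1' ∨ c = '2' ∨ c = '3' ∨ c = '4' ∨ c = '5' ∨ c = '6' ∨ c = '7' ∨ c = '8' ∨ c = '9' := by
  simp only [Char.le_def, UInt32.le_iff_toNat_le] at h1 h2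
  have hc : ∀ n, c.val.toNat = n → c = Char.ofNat n := by
    intro n hn; subst hn; exact (Char.ofNat_toNat c).symm
  have hv : c.val.toNat = 48 ∨ c.val.toNat = 49 ∨ c.val.toNat = 50 ∨ c.val.toNat = 51 ∨
      c.val.toNat = 52 ∨ c.val.toNat = 53 ∨ c.val.toNat = 54 ∨ c.val.toNat = 55 ∨
      c.val.toNat = 56 ∨ c.val.toNat = 57 := by
    have h48 : ('0' : Char).val.toNat = 48 := by decide
    have h57 : ('9' : Char).val.toNat = 57 := by decide
    omega
  rcases hv with h|h|h|h|h|h|h|h|h|h <;> simp [hc _ h]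

theorem digit_enum' (c : Char) (h1 : '1' ≤ c) (h2 : c ≤ '9') :
    c = '1' ∨ c = '2' ∨ c = '3' ∨ c = '4' ∨ c = '5' ∨ c = '6' ∨ c = '7' ∨ c = '8' ∨ c = '9' := by
  rcases digit_enum c (le_trans (by decide) h1) h2 with rfl | h | h
  · exact absurd h1 (by decide)
  · exact Or.inl h
  · exact Or.inr h

-- checkWin windows are exactly the toLists of the 21 codes
theorem checkWin_to_code (a b c : Char) (h : checkWin a b c = true) :
    ∃ code ∈ keralaCodes, code.toList = [a, b, c] := by
  simp only [checkWin, Bool.and_eq_true, Bool.or_eq_true, beq_iff_eq, decide_eq_true_eq] at h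
  obtain ⟨rfl, h⟩ := h
  rcases h with (⟨rfl, hc1, hc2⟩ | ⟨rfl, hc1, hc2⟩) | ⟨rfl, rfl | rfl⟩
  · rcases digit_enum' c hc1 hc2 with rfl|rfl|rfl|rfl|rfl|rfl|rfl|rfl|rfl <;> decide
  · rcases digit_enum c hc1 hc2 with rfl|rfl|rfl|rfl|rfl|rfl|rfl|rfl|rfl|rfl <;> decide
  · decide
  · decide

theorem scanChars_iff : ∀ (cs : List Char),
    scanChars cs = true ↔ ∃ a b c, checkWin a b c = true ∧ [a, b, c] <:+: cs
  | a :: b :: c :: rest => by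
      have ih := scanChars_iff (b :: c :: rest)
      simp only [scanChars]
      split_ifs with h
      · simp only [true_iff]
        exact ⟨a, b, c, h, ⟨[], rest, rfl⟩⟩
      · rw [ih]
        constructor
        · rintro ⟨x, y, z, hw, hinf⟩
          obtain ⟨u, v, huv⟩ := hinf
          exact ⟨x, y, z, hw, ⟨a :: u, v, by simp [huv]⟩⟩
        · rintro ⟨x, y, z, hw, hinf⟩
          rcases (List.infix_cons_iff).mp hinf with hpre | htail
          · obtain ⟨rfl, h2⟩ := List.cons_prefix_cons.mp hpre
            obtain ⟨rfl, h3⟩ := List.cons_prefix_cons.mp h2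
            obtain ⟨rfl, _⟩ := List.cons_prefix_cons.mp h3
            exact absurd hw (by simp [h])
          · exact ⟨x, y, z, hw, htail⟩
  | [] => by
      simp only [scanChars, Bool.false_eq_true, false_iff]
      rintro ⟨a, b, c, -, hinf⟩
      simpa using hinf.length_le
  | [x] => by
      simp only [scanChars, Bool.false_eq_true, false_iff]
      rintro ⟨a, b, c, -, hinf⟩
      simpa using hinf.length_le
  | [x, y] => by
      simp only [scanChars, Bool.false_eq_true, false_iff]
      rintro ⟨a, b, c, -, hinf⟩
      simpa using hinf.length_le

-- the heart: code-list search and window scan find the same thing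
theorem loop_eq_scan (s : String) : loopCodes keralaCodes s = scanChars s.toList := by
  rw [Bool.eq_iff_iff, loopCodes_iff, scanChars_iff]
  constructor
  · rintro ⟨code, hmem, hinf⟩
    revert hinf
    fin_cases hmem <;> (intro hinf; refine ⟨_, _, _, ?_, hinf⟩) <;> decide
  · rintro ⟨a, b, c, hw, hinf⟩
    obtain ⟨code, hmem, heq⟩ := checkWin_to_code a b c hw
    exact ⟨code, hmem, heq ▸ hinf⟩

-- ===== VERDICT (by name: the statement is the Claim_ definition above) =====
theorem is_kerala_region_spec : Claim_equal_is_kerala_region := by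
  intro phone _
  unfold Spec_is_kerala_region
  match phone with
  | none => rfl
  | some s =>
      simp only [is_kerala_region, is_kerala_region_alt]
      split_ifs with h
      · exact loop_eq_scan s
      · rfl
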